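-- pv_equiv track=rewrite | github.com/ba2664890/BiomeX_project | Scripts_model/retru.py | build_metadata_rows
-- ===== SOURCE A (Python) =====
-- def first_non_empty(*values):
--     for value in values:
--         if value is None:
--             continue
--         text = str(value).strip()
--         if text:
--             return text
--     return ""
--
-- def build_metadata_rows(ordered_ids, sample_name_map, record_by_mgid):
--     rows = []
--     pair_index = 1
--     idx = 0
--     while idx < len(ordered_ids):
--         id_t1 = ordered_ids[idx]
--         id_t2 = ordered_ids[idx + 1] if idx + 1 < len(ordered_ids) else None
--         rec_t1 = record_by_mgid.get(id_t1, {})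
--         rec_t2 = record_by_mgid.get(id_t2, {}) if id_t2 else {}
--
--         age = first_non_empty(rec_t1.get("age"), rec_t2.get("age"), "")
--         gender = first_non_empty(rec_t1.get("gender"), rec_t2.get("gender"), "U")
--         bmi = first_non_empty(rec_t1.get("bmi"), rec_t2.get("bmi"), "")
--         symptom_t1 = first_non_empty(rec_t1.get("symptom_level"), rec_t1.get("symptom"), "Unknown")
--         symptom_t2 = (
--             first_non_empty(rec_t2.get("symptom_level"), rec_t2.get("symptom"), "Unknown")
--             if id_t2
--             else ""
--         )
--
--         rows.append(
--             {
--                 "subject_id": f"BIOBANK_{pair_index:04d}",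
--                 "age": age,
--                 "gender": gender,
--                 "bmi": bmi,
--                 "symptom_T1": symptom_t1,
--                 "symptome_T2": symptom_t2,
--                 "sample_name_T1": sample_name_map[id_t1],
--                 "sample_name_T2": sample_name_map[id_t2] if id_t2 else "",
--             }
--         )
--         pair_index += 1
--         idx += 2
--     return rows
-- ===== SOURCE B (Python) =====
-- _KEYS = ("subject_id", "age", "gender", "bmi", "symptom_T1",
--          "symptome_T2", "sample_name_T1", "sample_name_T2")
--
--
-- def _pick(values, default):
--     for value in values:
--         if value is not None:
--             text = str(value).strip()
--             if text:
--                 return text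
--     return default
--
--
-- def build_metadata_rows(ordered_ids, sample_name_map, record_by_mgid):
--     # Columnar construction: split ids into the two time-point columns, pad the
--     # second with None, compute each output column in its own pass, then zip the
--     # columns back into row dicts.
--     t1s = ordered_ids[0::2]
--     t2s = ordered_ids[1::2]
--     t2s = t2s + [None] * (len(t1s) - len(t2s))
--     recs1 = [record_by_mgid.get(i, {}) for i in t1s]
--     recs2 = [record_by_mgid.get(i, {}) if i else {} for i in t2s]
--     columns = [
--         ["BIOBANK_%04d" % i for i in range(1, len(t1s) + 1)],
--         [_pick([r1.get("age"), r2.get("age")], "") for r1, r2 in zip(recs1, recs2)],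
--         [_pick([r1.get("gender"), r2.get("gender")], "U") for r1, r2 in zip(recs1, recs2)],
--         [_pick([r1.get("bmi"), r2.get("bmi")], "") for r1, r2 in zip(recs1, recs2)],
--         [_pick([r1.get("symptom_level"), r1.get("symptom")], "Unknown") for r1 in recs1],
--         [_pick([r2.get("symptom_level"), r2.get("symptom")], "Unknown") if i else ""
--          for i, r2 in zip(t2s, recs2)],
--         [sample_name_map[i] for i in t1s],
--         [sample_name_map[i] if i else "" for i in t2s],
--     ]
--     return [dict(zip(_KEYS, vals)) for vals in zip(*columns)]
-- ===== Notes on version B (the rewrite author's own statement) =====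
-- stated objective: alternative
-- what changed: Replaces A's row-at-a-time index-stepping while loop by a columnar construction: the ids are first split into the two time-point columns by step-2 slices (the second padded with None), each of the eight output columns is computed in its own pass, and the rows are reassembled at the end by zipping the columns back into dicts.
import Mathlib
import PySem

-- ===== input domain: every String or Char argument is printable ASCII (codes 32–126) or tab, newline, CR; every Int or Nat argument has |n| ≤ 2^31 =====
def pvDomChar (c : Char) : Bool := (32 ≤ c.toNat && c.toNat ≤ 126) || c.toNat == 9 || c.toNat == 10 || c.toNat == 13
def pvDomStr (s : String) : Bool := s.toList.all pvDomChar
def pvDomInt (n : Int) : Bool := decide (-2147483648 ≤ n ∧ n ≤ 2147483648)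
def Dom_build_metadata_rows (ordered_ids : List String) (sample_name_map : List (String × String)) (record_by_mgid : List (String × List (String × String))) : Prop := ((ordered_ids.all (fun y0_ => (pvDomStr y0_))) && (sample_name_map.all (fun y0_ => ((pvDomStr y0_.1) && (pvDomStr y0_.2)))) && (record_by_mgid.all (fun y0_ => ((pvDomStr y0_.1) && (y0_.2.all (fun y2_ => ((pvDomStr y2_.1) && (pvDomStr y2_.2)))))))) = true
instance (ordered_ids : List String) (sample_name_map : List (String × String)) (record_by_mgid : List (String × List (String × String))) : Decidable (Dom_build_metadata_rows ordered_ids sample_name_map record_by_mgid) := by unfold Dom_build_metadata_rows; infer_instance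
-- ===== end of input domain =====

-- B replaces A's row-at-a-time index-stepping loop by a columnar construction:
-- step-2 slices split the ids into two columns, each output column is computed in
-- its own pass, and rows are reassembled by zipping the columns (alternative; same cost).

-- f"BIOBANK_{i:04d}"'s number part (shared: both sources contain the identical format string)
def pyStr4 (n : Int) : String :=
  let cs := PySem.Int.toChars n
  String.ofList (List.replicate (4 - cs.length) '0' ++ cs)

-- ===== PORT A =====
-- variadic first_non_empty(*values) as a function on the list of (optional) arguments
def first_non_empty : List (Option String) → String
  | [] => ""
  | none :: rest => first_non_empty rest
  | some v :: rest =>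
      let text := PySem.Str.strip v
      if text ≠ "" then text else first_non_empty rest

-- the while loop; sample_name_map[...] would raise KeyError on a missing key — those
-- inputs are excluded by Pre_ below, the port totalises the subscript with getD "".
def buildRowsLoop (ordered_ids : List String) (sample_name_map : List (String × String)) (record_by_mgid : List (String × List (String × String))) (idx : Nat) (pair_index : Int) (rows : List (List (String × String))) : List (List (String × String)) :=
  if h : idx < ordered_ids.length then
    let id_t1 := ordered_ids.getD idx ""
    let id_t2 : Option String := if idx + 1 < ordered_ids.length then some (ordered_ids.getD (idx+1) "") else none
    let rec_t1 := (record_by_mgid.lookup id_t1).getD []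
    let rec_t2 := match id_t2 with
      | some s => if s ≠ "" then (record_by_mgid.lookup s).getD [] else []
      | none => []
    let age := first_non_empty [rec_t1.lookup "age", rec_t2.lookup "age", some ""]
    let gender := first_non_empty [rec_t1.lookup "gender", rec_t2.lookup "gender", some "U"]
    let bmi := first_non_empty [rec_t1.lookup "bmi", rec_t2.lookup "bmi", some ""]
    let symptom_t1 := first_non_empty [rec_t1.lookup "symptom_level", rec_t1.lookup "symptom", some "Unknown"]
    let symptom_t2 := match id_t2 with
      | some s => if s ≠ "" then first_non_empty [rec_t2.lookup "symptom_level", rec_t2.lookup "symptom", some "Unknown"] else ""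
      | none => ""
    let sname1 := (sample_name_map.lookup id_t1).getD ""
    let sname2 := match id_t2 with
      | some s => if s ≠ "" then (sample_name_map.lookup s).getD "" else ""
      | none => ""
    let row := [("subject_id", "BIOBANK_" ++ pyStr4 pair_index), ("age", age), ("gender", gender), ("bmi", bmi), ("symptom_T1", symptom_t1), ("symptome_T2", symptom_t2), ("sample_name_T1", sname1), ("sample_name_T2", sname2)]
    buildRowsLoop ordered_ids sample_name_map record_by_mgid (idx + 2) (pair_index + 1) (rows ++ [row])
  else rows
termination_by ordered_ids.length - idx
decreasing_by omega

def build_metadata_rows (ordered_ids : List String) (sample_name_map : List (String × String)) (record_by_mgid : List (String × List (String × String))) : List (List (String × String)) :=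
  buildRowsLoop ordered_ids sample_name_map record_by_mgid 0 1 []

-- ===== PORT B =====
-- hand port of the step-2 slice xs[0::2] (exact: every second element from index 0);
-- xs[1::2] is ported as everyOther (xs.drop 1)
def everyOther : List String → List String
  | [] => []
  | [a] => [a]
  | a :: _ :: rest => a :: everyOther rest

-- _pick(values, default)
def firstText : List (Option String) → String → String
  | [], default => default
  | none :: rest, default => firstText rest default
  | some v :: rest, default =>
      if PySem.Str.strip v ≠ "" then PySem.Str.strip v else firstText rest default

-- [dict(zip(_KEYS, vals)) for vals in zip(*columns)]: zip the 8 columns into row dicts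
def zip8 : List String → List String → List String → List String → List String → List String → List String → List String → List (List (String × String))
  | s::ss, a::as_, g::gs, b::bs, x::xs, y::ys, p::ps, q::qs =>
      [("subject_id", s), ("age", a), ("gender", g), ("bmi", b), ("symptom_T1", x), ("symptome_T2", y), ("sample_name_T1", p), ("sample_name_T2", q)] :: zip8 ss as_ gs bs xs ys ps qs
  | _, _, _, _, _, _, _, _ => []

-- sample_name_map[...] raises KeyError outside Pre_; totalised with getD "" as in port A
def build_metadata_rows_alt (ordered_ids : List String) (sample_name_map : List (String × String)) (record_by_mgid : List (String × List (String × String))) : List (List (String × String)) :=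
  let t1s := everyOther ordered_ids
  let t2s0 := everyOther (ordered_ids.drop 1)
  let t2s : List (Option String) := t2s0.map some ++ List.replicate (t1s.length - t2s0.length) none
  let recs1 := t1s.map (fun i => (record_by_mgid.lookup i).getD [])
  let recs2 := t2s.map (fun i => match i with
    | some s => if s ≠ "" then (record_by_mgid.lookup s).getD [] else []
    | none => [])
  zip8
    ((PySem.List.pyRange 1 (1 + (t1s.length : Int)) 1).map (fun i => "BIOBANK_" ++ pyStr4 i))
    ((recs1.zip recs2).map (fun p => firstText [p.1.lookup "age", p.2.lookup "age"] ""))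
    ((recs1.zip recs2).map (fun p => firstText [p.1.lookup "gender", p.2.lookup "gender"] "U"))
    ((recs1.zip recs2).map (fun p => firstText [p.1.lookup "bmi", p.2.lookup "bmi"] ""))
    (recs1.map (fun r1 => firstText [r1.lookup "symptom_level", r1.lookup "symptom"] "Unknown"))
    ((t2s.zip recs2).map (fun p => match p.1 with
      | some s => if s ≠ "" then firstText [p.2.lookup "symptom_level", p.2.lookup "symptom"] "Unknown" else ""
      | none => ""))
    (t1s.map (fun i => (sample_name_map.lookup i).getD ""))
    (t2s.map (fun i => match i with
      | some s => if s ≠ "" then (sample_name_map.lookup s).getD "" else ""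
      | none => ""))

-- ===== PRECONDITION & SPEC =====
-- Pre_ excludes exactly the inputs where Python A raises KeyError: sample_name_map[id_t1]
-- for ids at even positions, sample_name_map[id_t2] for truthy (non-empty) ids at odd positions.
def Pre_build_metadata_rows (ordered_ids : List String) (sample_name_map : List (String × String)) (_record_by_mgid : List (String × List (String × String))) : Prop :=
  ∀ i ∈ List.range ordered_ids.length,
    (i % 2 = 0 → (sample_name_map.lookup (ordered_ids.getD i "")).isSome = true) ∧
    (i % 2 = 1 → ordered_ids.getD i "" ≠ "" → (sample_name_map.lookup (ordered_ids.getD i "")).isSome = true)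
instance (ordered_ids : List String) (sample_name_map : List (String × String)) (record_by_mgid : List (String × List (String × String))) : Decidable (Pre_build_metadata_rows ordered_ids sample_name_map record_by_mgid) := by unfold Pre_build_metadata_rows; infer_instance

def pvWitness_build_metadata_rows : List String × (List (String × String)) × (List (String × List (String × String))) :=
  (["a", "b", "c"], [("a", "A"), ("b", "B"), ("c", "C")], [("a", [("age", " 30 "), ("symptom", "x")])])

def Spec_build_metadata_rows (ordered_ids : List String) (sample_name_map : List (String × String)) (record_by_mgid : List (String × List (String × String))) (out : List (List (String × String))) : Prop := out = build_metadata_rows_alt ordered_ids sample_name_map record_by_mgid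
instance (ordered_ids : List String) (sample_name_map : List (String × String)) (record_by_mgid : List (String × List (String × String))) (out : List (List (String × String))) : Decidable (Spec_build_metadata_rows ordered_ids sample_name_map record_by_mgid out) := by unfold Spec_build_metadata_rows; infer_instance

-- ===== CLAIM (what is proved, stated in full; the proofs are below) =====
def Claim_equal_build_metadata_rows : Prop := ∀ (ordered_ids : List String) (sample_name_map : List (String × String)) (record_by_mgid : List (String × List (String × String))), Dom_build_metadata_rows ordered_ids sample_name_map record_by_mgid → Pre_build_metadata_rows ordered_ids sample_name_map record_by_mgid → Spec_build_metadata_rows ordered_ids sample_name_map record_by_mgid (build_metadata_rows ordered_ids sample_name_map record_by_mgid)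

-- ===== LEMMAS AND PROOFS =====

-- middle form shared by both directions of the proof: rows as a map over the enumerated pairs
def pairUp : List String → List (String × Option String)
  | [] => []
  | [a] => [(a, none)]
  | a :: b :: rest => (a, some b) :: pairUp rest

def makeRow (pair_index : Int) (id_t1 : String) (id_t2 : Option String) (sample_name_map : List (String × String)) (record_by_mgid : List (String × List (String × String))) : List (String × String) :=
  let rec_t1 := (record_by_mgid.lookup id_t1).getD []
  let rec_t2 := match id_t2 with
    | some s => if s ≠ "" then (record_by_mgid.lookup s).getD [] else []
    | none => []
  [("subject_id", "BIOBANK_" ++ pyStr4 pair_index),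
   ("age", firstText [rec_t1.lookup "age", rec_t2.lookup "age"] ""),
   ("gender", firstText [rec_t1.lookup "gender", rec_t2.lookup "gender"] "U"),
   ("bmi", firstText [rec_t1.lookup "bmi", rec_t2.lookup "bmi"] ""),
   ("symptom_T1", firstText [rec_t1.lookup "symptom_level", rec_t1.lookup "symptom"] "Unknown"),
   ("symptome_T2", match id_t2 with
      | some s => if s ≠ "" then firstText [rec_t2.lookup "symptom_level", rec_t2.lookup "symptom"] "Unknown" else ""
      | none => ""),
   ("sample_name_T1", (sample_name_map.lookup id_t1).getD ""),
   ("sample_name_T2", match id_t2 with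
      | some s => if s ≠ "" then (sample_name_map.lookup s).getD "" else ""
      | none => "")]

-- A's trailing sentinel argument equals B's default parameter, for an already-stripped default
theorem first_non_empty_eq_firstText (xs : List (Option String)) (d : String)
    (hd : PySem.Str.strip d = d) :
    first_non_empty (xs ++ [some d]) = firstText xs d := by
  induction xs with
  | nil =>
      simp only [List.nil_append, first_non_empty, firstText, hd]
      by_cases h : d = "" <;> simp [h]
  | cons x rest ih =>
      cases x with
      | none => simpa [first_non_empty, firstText] using ih
      | some v =>
          simp only [List.cons_append, first_non_empty, firstText]
          split_ifs <;> simp [ih]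

theorem strip_empty : PySem.Str.strip "" = "" := by decide
theorem strip_U : PySem.Str.strip "U" = "U" := by decide
theorem strip_Unknown : PySem.Str.strip "Unknown" = "Unknown" := by decide

-- A equals the middle form
theorem loop_eq (sample_name_map : List (String × String)) (record_by_mgid : List (String × List (String × String))) :
    ∀ (n : Nat) (ordered_ids : List String) (idx : Nat), ordered_ids.length - idx ≤ n →
      ∀ (pi : Int) (rows : List (List (String × String))),
        buildRowsLoop ordered_ids sample_name_map record_by_mgid idx pi rows =
          rows ++ ((PySem.List.enumerate (pairUp (ordered_ids.drop idx)) pi).map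
            (fun p => makeRow p.1 p.2.1 p.2.2 sample_name_map record_by_mgid)) := by
  intro n
  induction n with
  | zero =>
      intro ids idx hn pi rows
      have hlen : ids.length ≤ idx := by omega
      have hdrop : ids.drop idx = [] := List.drop_eq_nil_of_le hlen
      rw [buildRowsLoop, dif_neg (by omega), hdrop]
      simp [pairUp, PySem.List.enumerate_nil]
  | succ n ih =>
      intro ids idx hn pi rows
      cases hdrop : ids.drop idx with
      | nil =>
          have : ids.length ≤ idx := by
            have := congrArg List.length hdrop
            simp [List.length_drop] at this; omega
          rw [buildRowsLoop, dif_neg (by omega)]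
          simp [pairUp, PySem.List.enumerate_nil]
      | cons a t =>
          have hlt : idx < ids.length := by
            have := congrArg List.length hdrop
            simp [List.length_drop] at this; omega
          have hga : ids.getD idx "" = a := by
            have h1 : ids[idx]? = some a := by
              rw [← List.head?_drop, hdrop]; rfl
            simp [List.getD_eq_getElem?_getD, h1]
          have hdrop1 : ids.drop (idx + 1) = t := by
            rw [← List.tail_drop, hdrop]; rfl
          cases t with
          | nil =>
              have hlen1 : ids.length ≤ idx + 1 := by
                have := congrArg List.length hdrop1
                simp [List.length_drop] at this; omega
              rw [buildRowsLoop, dif_pos hlt, hga, if_neg (by omega)]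
              rw [ih ids (idx + 2) (by simp at hn ⊢; omega)]
              have hdrop2 : ids.drop (idx + 2) = [] :=
                List.drop_eq_nil_of_le (by omega)
              rw [hdrop2]
              simp only [pairUp, PySem.List.enumerate_nil, PySem.List.enumerate_cons,
                List.map_nil, List.map_cons, List.append_nil]
              congr 1
              simp only [makeRow,
                ← first_non_empty_eq_firstText _ _ strip_empty,
                ← first_non_empty_eq_firstText _ _ strip_U,
                ← first_non_empty_eq_firstText _ _ strip_Unknown]
              rfl
          | cons b rest =>
              have hgb : ids.getD (idx + 1) "" = b := by
                have h1 : ids[idx + 1]? = some b := by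
                  rw [← List.head?_drop, hdrop1]; rfl
                simp [List.getD_eq_getElem?_getD, h1]
              have hlt1 : idx + 1 < ids.length := by
                have := congrArg List.length hdrop1
                simp [List.length_drop] at this; omega
              have hdrop2 : ids.drop (idx + 2) = rest := by
                rw [← List.tail_drop, hdrop1]; rfl
              rw [buildRowsLoop, dif_pos hlt, hga, if_pos hlt1, hgb]
              rw [ih ids (idx + 2) (by simp at hn ⊢; omega), hdrop2]
              simp only [pairUp, PySem.List.enumerate_cons, List.map_cons,
                List.append_assoc, List.singleton_append]
              congr 2
              simp only [makeRow,
                ← first_non_empty_eq_firstText _ _ strip_empty,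
                ← first_non_empty_eq_firstText _ _ strip_U,
                ← first_non_empty_eq_firstText _ _ strip_Unknown]
              rfl

-- B-side structural facts about the columns
theorem ev_cons (x : String) (l : List String) :
    everyOther (x :: l) = x :: everyOther (l.drop 1) := by
  cases l <;> rfl

def t2pad (ids : List String) : List (Option String) :=
  (everyOther (ids.drop 1)).map some ++
    List.replicate ((everyOther ids).length - (everyOther (ids.drop 1)).length) none

theorem t2pad_nil : t2pad [] = [] := rfl
theorem t2pad_single (a : String) : t2pad [a] = [none] := rfl
theorem t2pad_cons2 (a b : String) (r : List String) :
    t2pad (a :: b :: r) = some b :: t2pad r := by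
  simp only [t2pad, List.drop_succ_cons, List.drop_zero]
  rw [ev_cons b r]
  simp only [everyOther, List.length_cons, List.map_cons, List.cons_append]
  congr 3
  omega

-- B's zipped-columns expression, generalized over the starting pair index
def colsForm (ids : List String) (sample_name_map : List (String × String)) (record_by_mgid : List (String × List (String × String))) (pi : Int) : List (List (String × String)) :=
  let t1s := everyOther ids
  let t2s := t2pad ids
  let recs1 := t1s.map (fun i => (record_by_mgid.lookup i).getD [])
  let recs2 := t2s.map (fun i => match i with
    | some s => if s ≠ "" then (record_by_mgid.lookup s).getD [] else []
    | none => [])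
  zip8
    ((PySem.List.pyRange pi (pi + (t1s.length : Int)) 1).map (fun i => "BIOBANK_" ++ pyStr4 i))
    ((recs1.zip recs2).map (fun p => firstText [p.1.lookup "age", p.2.lookup "age"] ""))
    ((recs1.zip recs2).map (fun p => firstText [p.1.lookup "gender", p.2.lookup "gender"] "U"))
    ((recs1.zip recs2).map (fun p => firstText [p.1.lookup "bmi", p.2.lookup "bmi"] ""))
    (recs1.map (fun r1 => firstText [r1.lookup "symptom_level", r1.lookup "symptom"] "Unknown"))
    ((t2s.zip recs2).map (fun p => match p.1 with
      | some s => if s ≠ "" then firstText [p.2.lookup "symptom_level", p.2.lookup "symptom"] "Unknown" else ""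
      | none => ""))
    (t1s.map (fun i => (sample_name_map.lookup i).getD ""))
    (t2s.map (fun i => match i with
      | some s => if s ≠ "" then (sample_name_map.lookup s).getD "" else ""
      | none => ""))

theorem alt_eq_colsForm (ids : List String) (smap : List (String × String)) (rmap : List (String × List (String × String))) :
    build_metadata_rows_alt ids smap rmap = colsForm ids smap rmap 1 := rfl

-- B's columnar form equals the middle form
theorem colsForm_eq (smap : List (String × String)) (rmap : List (String × List (String × String))) :
    ∀ (n : Nat) (ids : List String), ids.length ≤ n → ∀ (pi : Int),
      colsForm ids smap rmap pi =
        (PySem.List.enumerate (pairUp ids) pi).map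
          (fun p => makeRow p.1 p.2.1 p.2.2 smap rmap) := by
  intro n
  induction n with
  | zero =>
      intro ids h pi
      have : ids = [] := List.length_eq_zero_iff.mp (by omega)
      subst this
      simp only [colsForm, everyOther, t2pad_nil, List.length_nil, List.map_nil,
        List.zip_nil_right]
      rw [PySem.List.pyRange_one_eq_nil (by simp)]
      rfl
  | succ n ih =>
      intro ids h pi
      match ids with
      | [] =>
          simp only [colsForm, everyOther, t2pad_nil, List.length_nil, List.map_nil,
            List.zip_nil_right]
          rw [PySem.List.pyRange_one_eq_nil (by simp)]
          rfl
      | [a] =>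
          show colsForm [a] smap rmap pi = _
          simp only [colsForm, everyOther, t2pad_single, List.length_cons, List.length_nil,
            List.map_cons, List.map_nil, List.zip_cons_cons, List.zip_nil_right,
            pairUp, PySem.List.enumerate_cons, PySem.List.enumerate_nil]
          rw [show pi + ((1 : Nat) : Int) = pi + 1 by norm_num,
            PySem.List.pyRange_one_cons (by omega), PySem.List.pyRange_one_eq_nil (by omega)]
          rfl
      | a :: b :: rest =>
          have h2 : rest.length ≤ n := by simp at h; omega
          show colsForm (a :: b :: rest) smap rmap pi = _
          simp only [colsForm, everyOther, t2pad_cons2, List.length_cons,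
            List.map_cons, List.zip_cons_cons, pairUp, PySem.List.enumerate_cons, List.map_cons]
          rw [show pi + (((everyOther rest).length + 1 : Nat) : Int)
                = pi + ((everyOther rest).length : Int) + 1 by push_cast; ring,
            show pi + ((everyOther rest).length : Int) + 1
                = (pi + 1) + ((everyOther rest).length : Int) by ring,
            PySem.List.pyRange_one_cons (by
              have : (0:Int) ≤ ((everyOther rest).length : Int) := by positivity
              omega)]
          simp only [List.map_cons, zip8]
          rw [show (PySem.List.enumerate (pairUp rest) (pi + 1)).map
                (fun p => makeRow p.1 p.2.1 p.2.2 smap rmap)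
              = colsForm rest smap rmap (pi + 1) from (ih rest h2 (pi + 1)).symm]
          rfl

-- ===== VERDICT (by name: the statement is the Claim_ definition above) =====
theorem build_metadata_rows_spec : Claim_equal_build_metadata_rows := by
  intro ordered_ids sample_name_map record_by_mgid _hDom _hPre
  unfold Spec_build_metadata_rows build_metadata_rows
  rw [loop_eq sample_name_map record_by_mgid ordered_ids.length ordered_ids 0 (by omega),
    alt_eq_colsForm,
    colsForm_eq sample_name_map record_by_mgid ordered_ids.length ordered_ids (by omega) 1]
  simp
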